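-- pv_equiv track=rewrite | github.com/arkocal/tetai | ai_players/features.py | nr_holes
-- ===== SOURCE A (Python) =====
-- def nr_holes(field):
--     """Return 6 (selected arbitrary) list of holes,
--     each element describing the height."""
--     ARBITRARY_DEPTH = 6
--     width = len(field)
--     height = len(field[0]) # Count tuckable holes too, much easier!
--     nr_holes = [0 for _ in range(ARBITRARY_DEPTH)]
--     for x in range(width):
--         depth = 0
--         for y in range(height):
--             if field[x][y]:
--                 if depth:
--                     nr_holes[min(depth-1, ARBITRARY_DEPTH-1)] += 1
--                 depth = 0
--             else:
--                 depth += 1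
--     return nr_holes
-- ===== SOURCE B (Python) =====
-- def nr_holes(field):
--     """Return 6 (selected arbitrary) list of holes,
--     each element describing the height."""
--     height = len(field[0])
--     buckets = [0, 0, 0, 0, 0, 0]
--     for col in field:
--         # run-length encode the column's truthiness (read exactly `height` cells)
--         runs = []  # list of [truthy, run_length], in column order
--         for y in range(height):
--             v = bool(col[y])
--             if runs and runs[-1][0] == v:
--                 runs[-1][1] += 1
--             else:
--                 runs.append([v, 1])
--         # every empty run except a trailing one is capped by a filled cell: a hole
--         for t, n in runs[:-1]:
--             if not t:
--                 buckets[min(n - 1, 5)] += 1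
--     return buckets
-- ===== Notes on version B (the rewrite author's own statement) =====
-- stated objective: alternative
-- what changed: Replaces A's stateful depth-counter scan (carrying a running falsy-run depth and bumping a bucket whenever a filled cell closes it) with a per-column run-length encoding: each column is grouped into alternating truthy/falsy runs and every falsy run except a trailing one is bucketed by min(len-1,5).
import Mathlib
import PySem

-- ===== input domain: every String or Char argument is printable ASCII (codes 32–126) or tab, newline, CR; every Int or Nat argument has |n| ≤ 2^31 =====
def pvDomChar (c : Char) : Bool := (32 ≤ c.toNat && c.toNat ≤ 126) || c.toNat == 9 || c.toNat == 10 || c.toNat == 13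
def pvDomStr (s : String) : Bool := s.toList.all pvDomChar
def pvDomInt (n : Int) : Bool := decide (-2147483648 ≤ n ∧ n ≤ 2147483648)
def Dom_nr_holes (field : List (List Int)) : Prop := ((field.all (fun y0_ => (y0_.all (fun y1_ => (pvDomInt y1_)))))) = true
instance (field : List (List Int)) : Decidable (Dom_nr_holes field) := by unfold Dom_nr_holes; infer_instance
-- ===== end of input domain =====

-- B re-decomposes A's stateful depth-counter scan as run-length encoding per column;
-- same cost, different structure (objective: alternative).

-- ===== PORT A =====
-- nr_holes[i] += 1
def bumpA (b : List Int) (k : Nat) : List Int := b.set k (b.getD k 0 + 1)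

def nr_holes (field : List (List Int)) : List Int :=
  -- height = len(field[0]); Pre_ guarantees field ≠ [] so getD never fires
  let height := ((PySem.List.pyGet? field 0).getD []).length
  field.foldl (fun (st : List Int) col =>
    ((List.range height).foldl (fun (s : Nat × List Int) y =>
        -- field[x][y]; Pre_ guarantees the index is in range, so getD never fires
        let cell := (PySem.List.pyGet? col (y : Int)).getD 0
        if cell ≠ 0 then
          (0, if s.1 ≠ 0 then bumpA s.2 (min (s.1 - 1) 5) else s.2)
        else (s.1 + 1, s.2)) (0, st)).2) [0, 0, 0, 0, 0, 0]

-- ===== PORT B =====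
def bumpB (b : List Int) (k : Nat) : List Int := b.set k (b.getD k 0 + 1)

-- Source B keeps `runs` in column order and mutates the last entry in place; the port keeps
-- the list most-recent-first (head = last entry) and reverses it when the loop is done.
def runsStep (r : List (Bool × Nat)) (v : Bool) : List (Bool × Nat) :=
  match r with
  | (w, n) :: t => if w = v then (v, n + 1) :: t else (v, 1) :: (w, n) :: t
  | [] => [(v, 1)]

def nr_holes_alt (field : List (List Int)) : List Int :=
  let height := ((PySem.List.pyGet? field 0).getD []).length
  field.foldl (fun (b : List Int) col =>
    let cells : List Bool :=
      (List.range height).map (fun y => decide (((PySem.List.pyGet? col (y : Int)).getD 0) ≠ 0))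
    let runs := (cells.foldl runsStep []).reverse
    runs.dropLast.foldl (fun b p => if p.1 then b else bumpB b (min (p.2 - 1) 5)) b)
    [0, 0, 0, 0, 0, 0]

-- ===== PRECONDITION & SPEC =====
-- Pre_ excludes exactly the inputs where A raises IndexError: the empty field (field[0])
-- and ragged fields with a column shorter than the first one (field[x][y]).
def Pre_nr_holes (field : List (List Int)) : Prop :=
  field ≠ [] ∧ ∀ row ∈ field, (field.headD []).length ≤ row.length
instance (field : List (List Int)) : Decidable (Pre_nr_holes field) := by
  unfold Pre_nr_holes; infer_instance

def pvWitness_nr_holes : List (List Int) := [[1, 0, 1], [0, 0, 1]]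

def Spec_nr_holes (field : List (List Int)) (out : List Int) : Prop := out = nr_holes_alt field
instance (field : List (List Int)) (out : List Int) : Decidable (Spec_nr_holes field out) := by
  unfold Spec_nr_holes; infer_instance

-- ===== CLAIM (what is proved, stated in full; the proofs are below) =====
def Claim_equal_nr_holes : Prop :=
  ∀ (field : List (List Int)), Dom_nr_holes field → Pre_nr_holes field →
    Spec_nr_holes field (nr_holes field)

-- ===== LEMMAS AND PROOFS =====

-- abstract step functions of the two inner loops, over the Boolean cell value
def pvStepA (s : Nat × List Int) (v : Bool) : Nat × List Int :=
  if v then (0, if s.1 ≠ 0 then bumpA s.2 (min (s.1 - 1) 5) else s.2) else (s.1 + 1, s.2)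

def pvBump' (b : List Int) (p : Bool × Nat) : List Int :=
  if p.1 then b else bumpB b (min (p.2 - 1) 5)

def pvInitR (d : Nat) : List (Bool × Nat) := if d = 0 then [] else [(false, d)]

def pvG (t : List (Bool × Nat)) (b : List Int) : List Int := t.reverse.foldl pvBump' b

def pvFinish (rr : List (Bool × Nat)) (b : List Int) : List Int :=
  rr.reverse.dropLast.foldl pvBump' b

def pvC (d : Nat) (t : List (Bool × Nat)) : Prop :=
  d = 0 → t = [] ∨ ∃ n tt, t = (true, n) :: tt

lemma pvG_true_cons (n : Nat) (tt : List (Bool × Nat)) (b : List Int) :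
    pvG ((true, n) :: tt) b = pvG tt b := by
  simp [pvG, pvBump']

lemma pvFinish_init (d : Nat) (t : List (Bool × Nat)) (b : List Int) (hC : pvC d t) :
    pvFinish (pvInitR d ++ t) b = pvG t b := by
  by_cases hd : d = 0
  · subst hd
    rcases hC rfl with h | ⟨n, tt, h⟩ <;> subst h
    · simp [pvFinish, pvG, pvInitR]
    · simp [pvFinish, pvG, pvInitR, pvBump']
  · simp [pvFinish, pvG, pvInitR, hd]

lemma pv_col_eq (bs : List Bool) : ∀ (d : Nat) (t : List (Bool × Nat)) (b : List Int),
    pvC d t →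
    (bs.foldl pvStepA (d, pvG t b)).2 = pvFinish (bs.foldl runsStep (pvInitR d ++ t)) b := by
  induction bs with
  | nil => intro d t b hC; simpa using (pvFinish_init d t b hC).symm
  | cons v rest ih =>
    intro d t b hC
    cases v
    · -- falsy cell: depth += 1, run extends / starts
      have hstate : runsStep (pvInitR d ++ t) false = pvInitR (d + 1) ++ t := by
        by_cases hd : d = 0
        · subst hd
          rcases hC rfl with h | ⟨n, tt, h⟩ <;> subst h <;> simp [pvInitR, runsStep]
        · simp [pvInitR, hd, runsStep]
      have := ih (d + 1) t b (by intro h; omega)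
      simpa [List.foldl_cons, pvStepA, hstate] using this
    · -- truthy cell
      by_cases hd : d = 0
      · subst hd
        rcases hC rfl with h | ⟨n, tt, h⟩ <;> subst h
        · have := ih 0 [(true, 1)] b (by intro _; exact Or.inr ⟨1, [], rfl⟩)
          simpa [List.foldl_cons, pvStepA, pvInitR, runsStep, pvG] using this
        · have := ih 0 ((true, n + 1) :: tt) b (by intro _; exact Or.inr ⟨n + 1, tt, rfl⟩)
          simpa [List.foldl_cons, pvStepA, pvInitR, runsStep,
                 pvG_true_cons] using this
      · -- close the open falsy run: bump bucket min(d-1,5)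
        have := ih 0 ((true, 1) :: (false, d) :: t) b
          (by intro _; exact Or.inr ⟨1, (false, d) :: t, rfl⟩)
        have hg : pvG ((true, 1) :: (false, d) :: t) b = bumpA (pvG t b) (min (d - 1) 5) := by
          simp [pvG, pvBump', bumpA, bumpB]
        rw [hg] at this
        simpa [List.foldl_cons, pvStepA, pvInitR, hd, runsStep] using this

-- the two Int-level inner-loop bodies coincide with the Bool-level step functions
lemma pv_bodyA (s : Nat × List Int) (c : Int) :
    (if c ≠ 0 then (0, if s.1 ≠ 0 then bumpA s.2 (min (s.1 - 1) 5) else s.2)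
     else (s.1 + 1, s.2)) = pvStepA s (decide (c ≠ 0)) := by
  by_cases h : c = 0 <;> simp [pvStepA, h]

lemma pv_col_contrib (col : List Int) (height : Nat) (st : List Int) :
    ((List.range height).foldl (fun (s : Nat × List Int) y =>
        let cell := (PySem.List.pyGet? col (y : Int)).getD 0
        if cell ≠ 0 then
          (0, if s.1 ≠ 0 then bumpA s.2 (min (s.1 - 1) 5) else s.2)
        else (s.1 + 1, s.2)) (0, st)).2
    = (let cells : List Bool :=
         (List.range height).map (fun y => decide (((PySem.List.pyGet? col (y : Int)).getD 0) ≠ 0))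
       let runs := (cells.foldl runsStep []).reverse
       runs.dropLast.foldl (fun b p => if p.1 then b else bumpB b (min (p.2 - 1) 5)) st) := by
  have hmap :
      (List.range height).foldl (fun (s : Nat × List Int) y =>
        let cell := (PySem.List.pyGet? col (y : Int)).getD 0
        if cell ≠ 0 then
          (0, if s.1 ≠ 0 then bumpA s.2 (min (s.1 - 1) 5) else s.2)
        else (s.1 + 1, s.2)) (0, st)
      = ((List.range height).map
          (fun y => decide (((PySem.List.pyGet? col (y : Int)).getD 0) ≠ 0))).foldl
          pvStepA (0, st) := by
    rw [List.foldl_map]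
    congr 1
    funext s y
    exact pv_bodyA s _
  have hmain := pv_col_eq
    ((List.range height).map (fun y => decide (((PySem.List.pyGet? col (y : Int)).getD 0) ≠ 0)))
    0 [] st (by intro _; exact Or.inl rfl)
  simp only [pvInitR, pvG, List.reverse_nil, List.foldl_nil] at hmain
  rw [hmap, hmain]
  simp [pvFinish, pvBump']

-- ===== VERDICT (by name: the statement is the Claim_ definition above) =====
theorem nr_holes_spec : Claim_equal_nr_holes := by
  intro field _ _
  show nr_holes field = nr_holes_alt field
  simp only [nr_holes, nr_holes_alt]
  generalize ((PySem.List.pyGet? field 0).getD []).length = height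
  congr 1
  funext st col
  exact pv_col_contrib col height st
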